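-- pv_equiv track=rewrite | github.com/artkoder/cat-weather-new | imgio.py | _iter_quality_steps
-- ===== SOURCE A (Python) =====
-- def _iter_quality_steps(min_quality: int) -> list[int]:
--     base_steps = [92, 88, 86]
--     qualities = [q for q in base_steps if q >= min_quality]
--     if min_quality > max(qualities, default=0):
--         qualities.append(min_quality)
--     if min_quality not in qualities:
--         qualities.append(min_quality)
--     # ensure descending order and remove duplicates while preserving order
--     seen: set[int] = set()
--     ordered: list[int] = []
--     for value in qualities:
--         if value not in seen:
--             ordered.append(value)
--             seen.add(value)
--     ordered.sort(reverse=True)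
--     if ordered[-1] != min_quality:
--         ordered.append(min_quality)
--     return ordered
-- ===== SOURCE B (Python) =====
-- def _iter_quality_steps(min_quality: int) -> list[int]:
--     # steps strictly above min_quality (base list is already descending & distinct),
--     # then min_quality itself as the final, smallest step
--     return [q for q in (92, 88, 86) if q > min_quality] + [min_quality]
-- ===== Notes on version B (the rewrite author's own statement) =====
-- stated objective: simpler
-- what changed: Replaces the filter/max-branch/membership-branch/dedup-loop/sort/last-element-patch pipeline by a single filter of the fixed descending base list for values strictly greater than min_quality, followed by appending min_quality.
import Mathlib
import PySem

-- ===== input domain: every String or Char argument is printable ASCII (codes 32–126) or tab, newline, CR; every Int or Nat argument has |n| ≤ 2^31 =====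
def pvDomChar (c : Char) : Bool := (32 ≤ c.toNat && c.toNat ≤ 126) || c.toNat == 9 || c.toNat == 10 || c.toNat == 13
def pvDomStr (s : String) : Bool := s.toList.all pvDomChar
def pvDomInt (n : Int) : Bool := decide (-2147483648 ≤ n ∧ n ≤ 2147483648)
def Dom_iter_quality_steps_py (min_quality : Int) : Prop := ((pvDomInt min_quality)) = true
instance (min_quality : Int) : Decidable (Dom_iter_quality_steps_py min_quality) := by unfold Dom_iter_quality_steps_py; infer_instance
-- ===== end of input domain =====

-- B replaces A's filter/max-branch/membership-branch/dedup-loop/sort/last-element pipeline by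
-- one strict filter of the fixed descending base list plus an appended min_quality (simpler).

-- ===== PORT A =====
def iter_quality_steps_py (min_quality : Int) : List Int :=
  let base_steps : List Int := [92, 88, 86]
  let qualities : List Int := base_steps.filter (fun q => decide (q ≥ min_quality))
  let qualities : List Int :=
    if min_quality > ((PySem.List.max? qualities (fun x => x)).getD 0)
    then qualities ++ [min_quality] else qualities
  let qualities : List Int :=
    if ¬ (min_quality ∈ qualities) then qualities ++ [min_quality] else qualities
  let st : List Int × PySem.Set Int :=
    qualities.foldl (fun st value =>
      if PySem.Set.contains st.2 value then st
      else (st.1 ++ [value], PySem.Set.add st.2 value)) ([], PySem.Set.empty)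
  let ordered : List Int := PySem.List.sorted st.1 (fun x => x) true
  -- ordered[-1]: ordered is provably nonempty here, so the total form pyGetD is exact
  if PySem.List.pyGetD ordered (-1) 0 ≠ min_quality then ordered ++ [min_quality] else ordered

-- ===== PORT B =====
def iter_quality_steps_py_alt (min_quality : Int) : List Int :=
  (([92, 88, 86] : List Int).filter (fun q => decide (q > min_quality))) ++ [min_quality]

-- ===== PRECONDITION & SPEC =====
def Spec_iter_quality_steps_py (min_quality : Int) (out : List Int) : Prop := out = iter_quality_steps_py_alt min_quality
instance (min_quality : Int) (out : List Int) : Decidable (Spec_iter_quality_steps_py min_quality out) := by unfold Spec_iter_quality_steps_py; infer_instance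

-- ===== CLAIM (what is proved, stated in full; the proofs are below) =====
def Claim_equal_iter_quality_steps_py : Prop := ∀ (min_quality : Int), Dom_iter_quality_steps_py min_quality → Spec_iter_quality_steps_py min_quality (iter_quality_steps_py min_quality)

-- ===== LEMMAS AND PROOFS =====

-- ===== VERDICT (by name: the statement is the Claim_ definition above) =====
theorem iter_quality_steps_py_spec : Claim_equal_iter_quality_steps_py := by
  intro m _
  unfold Spec_iter_quality_steps_py
  rcases (show m ≤ 85 ∨ m = 86 ∨ m = 87 ∨ m = 88 ∨ (89 ≤ m ∧ m ≤ 91) ∨ m = 92 ∨ 93 ≤ m by omega)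
    with h | h | h | h | ⟨h1, h2⟩ | h | h
  · have hmem : m ∉ ([92, 88, 86] : List Int) := by simp; omega
    simp [iter_quality_steps_py, iter_quality_steps_py_alt, List.filter,
      PySem.List.max?, PySem.List.sorted, PySem.List.insertBy, PySem.Set.contains, PySem.Set.add, PySem.Set.empty,
      PySem.List.pyGetD, PySem.List.pyGet?, PySem.List.pyIdx?, hmem,
      show ((92:Int) ≥ m) by omega, show ((88:Int) ≥ m) by omega, show ((86:Int) ≥ m) by omega,
      show ¬((92:Int) < m) by omega, show ¬((88:Int) < m) by omega, show ¬((86:Int) < m) by omega,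
      show (m < (92:Int)) by omega, show (m < (88:Int)) by omega, show (m < (86:Int)) by omega]
  · subst h; decide
  · subst h; decide
  · subst h; decide
  · have hmem : m ∉ ([92] : List Int) := by simp; omega
    simp [iter_quality_steps_py, iter_quality_steps_py_alt, List.filter,
      PySem.List.max?, PySem.List.sorted, PySem.List.insertBy, PySem.Set.contains, PySem.Set.add, PySem.Set.empty,
      PySem.List.pyGetD, PySem.List.pyGet?, PySem.List.pyIdx?, hmem,
      show ((92:Int) ≥ m) by omega, show ¬((88:Int) ≥ m) by omega, show ¬((86:Int) ≥ m) by omega,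
      show ¬((92:Int) < m) by omega, show (m < (92:Int)) by omega,
      show ¬(m < (88:Int)) by omega, show ¬(m < (86:Int)) by omega]
  · subst h; decide
  · simp [iter_quality_steps_py, iter_quality_steps_py_alt, List.filter,
      PySem.List.max?, PySem.List.sorted, PySem.List.insertBy, PySem.Set.contains, PySem.Set.add, PySem.Set.empty,
      PySem.List.pyGetD, PySem.List.pyGet?, PySem.List.pyIdx?,
      show ¬((92:Int) ≥ m) by omega, show ¬((88:Int) ≥ m) by omega, show ¬((86:Int) ≥ m) by omega,
      show ((0:Int) < m) by omega,
      show ¬(m < (92:Int)) by omega, show ¬(m < (88:Int)) by omega, show ¬(m < (86:Int)) by omega]
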